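-- pv_equiv track=rewrite | github.com/szaydel/samba | python/samba/tests/dns_packet.py | _make_long_name
-- ===== SOURCE A (Python) =====
-- def _make_long_name(length, first_component=None):
--     name = []
--     if first_component is not None:
--         name.append(first_component)
--         length -= len(first_component) + 1
--     while length > 33:
--         name.append("x" * 30)
--         length -= 31
--     name.append("x" * length)
--     return '.'.join(name)
-- ===== SOURCE B (Python) =====
-- def _make_long_name(length, first_component=None):
--     head = [] if first_component is None else [first_component]
--     if first_component is not None:
--         length -= len(first_component) + 1
--     k = max(0, -((33 - length) // 31))
--     return '.'.join(head + ["x" * 30] * k + ["x" * (length - 31 * k)])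
-- ===== Notes on version B (the rewrite author's own statement) =====
-- stated objective: faster
-- what changed: The while-loop that appends 30-'x' blocks one at a time is replaced by a closed-form block count k = max(0, -((33 - length) // 31)) and list multiplication, building the component list in one expression.
import Mathlib
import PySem

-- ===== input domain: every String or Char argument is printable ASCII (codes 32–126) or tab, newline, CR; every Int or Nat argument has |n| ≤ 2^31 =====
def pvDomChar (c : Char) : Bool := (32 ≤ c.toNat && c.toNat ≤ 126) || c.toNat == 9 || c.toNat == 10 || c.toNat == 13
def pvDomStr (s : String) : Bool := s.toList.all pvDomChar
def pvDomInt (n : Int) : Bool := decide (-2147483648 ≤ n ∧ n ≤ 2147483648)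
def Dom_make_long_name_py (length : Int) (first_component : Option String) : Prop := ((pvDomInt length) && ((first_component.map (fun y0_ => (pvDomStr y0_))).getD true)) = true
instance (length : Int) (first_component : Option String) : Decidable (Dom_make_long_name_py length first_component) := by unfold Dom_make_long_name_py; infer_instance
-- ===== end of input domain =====

-- B replaces A's while-loop with a closed-form count of full 30-'x' blocks (O(1) Python-level steps instead of one loop iteration per block).


-- ===== PORT A =====
-- the while-loop: while length > 33: name.append("x"*30); length -= 31; then name.append("x"*length)
def mlnLoop (length : Int) (name : List String) : List String :=
  if length > 33 then
    mlnLoop (length - 31) (name ++ [String.mk (PySem.List.pyRepeat ['x'] 30)])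
  else
    name ++ [String.mk (PySem.List.pyRepeat ['x'] length)]
termination_by (length - 33).toNat
decreasing_by omega

def make_long_name_py (length : Int) (first_component : Option String) : String :=
  match first_component with
  | none => PySem.Str.join "." (mlnLoop length [])
  | some f => PySem.Str.join "." (mlnLoop (length - (PySem.Str.len f + 1)) [f])

-- ===== PORT B =====
def make_long_name_py_alt (length : Int) (first_component : Option String) : String :=
  let head : List String := match first_component with | none => [] | some f => [f]
  let eff : Int := match first_component with | none => length | some f => length - (PySem.Str.len f + 1)
  let k : Int := max 0 (-(PySem.Int.floordiv (33 - eff) 31))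
  PySem.Str.join "." (head ++ PySem.List.pyRepeat [String.mk (PySem.List.pyRepeat ['x'] 30)] k
      ++ [String.mk (PySem.List.pyRepeat ['x'] (eff - 31 * k))])

-- ===== PRECONDITION & SPEC =====
def Spec_make_long_name_py (length : Int) (first_component : Option String) (out : String) : Prop := out = make_long_name_py_alt length first_component
instance (length : Int) (first_component : Option String) (out : String) : Decidable (Spec_make_long_name_py length first_component out) := by unfold Spec_make_long_name_py; infer_instance

-- ===== CLAIM (what is proved, stated in full; the proofs are below) =====
def Claim_equal_make_long_name_py : Prop := ∀ (length : Int) (first_component : Option String), Dom_make_long_name_py length first_component → Spec_make_long_name_py length first_component (make_long_name_py length first_component)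

-- ===== LEMMAS AND PROOFS =====

-- closed-form block count used by B
def kOf (L : Int) : Int := max 0 (-(PySem.Int.floordiv (33 - L) 31))

lemma kOf_nonpos (L : Int) (h : L ≤ 33) : kOf L = 0 := by
  unfold kOf
  rw [PySem.Int.floordiv_eq_ediv_of_pos (by norm_num)]
  have : 0 ≤ (33 - L) / 31 := Int.ediv_nonneg (by omega) (by norm_num)
  omega

lemma kOf_step (L : Int) (h : 33 < L) : kOf L = kOf (L - 31) + 1 := by
  unfold kOf
  rw [PySem.Int.floordiv_eq_ediv_of_pos (by norm_num), PySem.Int.floordiv_eq_ediv_of_pos (by norm_num)]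
  have h1 : (33 - L) = (33 - (L - 31)) + (-1) * 31 := by ring
  have h2 : (33 - L) / 31 = (33 - (L - 31)) / 31 + (-1) := by
    rw [h1, Int.add_mul_ediv_right _ _ (by norm_num : (31:Int) ≠ 0)]
  have h3 : (33 - (L - 31)) / 31 ≤ 0 := by
    have : (33 - (L - 31)) / 31 < 1 := by
      rw [Int.ediv_lt_iff_lt_mul (by norm_num)]; omega
    omega
  omega

lemma kOf_nonneg (L : Int) : 0 ≤ kOf L := le_max_left _ _

lemma mlnLoop_closed (L : Int) (name : List String) :
    mlnLoop L name = name ++ List.replicate (kOf L).toNat (String.mk (PySem.List.pyRepeat ['x'] 30))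
      ++ [String.mk (PySem.List.pyRepeat ['x'] (L - 31 * kOf L))] := by
  fun_induction mlnLoop L name with
  | case1 L name hL ih =>
    rw [ih, kOf_step L hL]
    have hk := kOf_nonneg (L - 31)
    have htn : (kOf (L - 31) + 1).toNat = (kOf (L - 31)).toNat + 1 := by omega
    have ht : L - 31 * (kOf (L - 31) + 1) = L - 31 - 31 * kOf (L - 31) := by ring
    rw [htn, ht, List.replicate_succ]
    simp
  | case2 L name hL =>
    rw [kOf_nonpos L (by omega)]
    simp

-- bridge from the two ports' surface forms to the closed-form lemma
theorem make_long_name_py_spec : Claim_equal_make_long_name_py := by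
  intro length first_component _
  unfold Spec_make_long_name_py make_long_name_py make_long_name_py_alt
  cases first_component with
  | none =>
    simp only
    rw [mlnLoop_closed length []]
    simp only [kOf, PySem.List.pyRepeat_singleton]
  | some f =>
    simp only
    rw [mlnLoop_closed _ [f]]
    simp only [kOf, PySem.List.pyRepeat_singleton]
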